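-- pv_equiv track=rewrite | github.com/robinwyeo/robinwyeo.github.io | scripts/nbconvert_clt_postprocess.py | dollar_inline_to_paren
-- ===== SOURCE A (Python) =====
-- def dollar_inline_to_paren(text: str) -> str:
--     """Replace $...$ with \\(...\\), leaving $$...$$ unchanged."""
--     out: list[str] = []
--     i = 0
--     n = len(text)
--     while i < n:
--         if text.startswith("$$", i):
--             j = text.find("$$", i + 2)
--             if j < 0:
--                 out.append(text[i])
--                 i += 1
--                 continue
--             out.append(text[i : j + 2])
--             i = j + 2
--         elif text[i] == "$":
--             j = text.find("$", i + 1)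
--             if j < 0:
--                 out.append(text[i])
--                 i += 1
--                 continue
--             out.append("\\(" + text[i + 1 : j] + "\\)")
--             i = j + 1
--         else:
--             out.append(text[i])
--             i += 1
--     return "".join(out)
-- ===== SOURCE B (Python) =====
-- def dollar_inline_to_paren(text: str) -> str:
--     """Replace $...$ with \\(...\\), leaving $$...$$ unchanged.
--
--     Works on the dollar-delimited segment list produced by one split('$')
--     instead of scanning characters: segment t sits after dollar number t."""
--     segs = text.split('$')
--     m = len(segs) - 1
--     out = [segs[0]]
--     t = 1
--     while t <= m:
--         q = segs[t]
--         if q == '' and t < m: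
--             # '$$' opener at dollars t, t+1: the closing '$$' is the first
--             # adjacent dollar pair after it, i.e. the first empty segment
--             # segs[u] with t+2 <= u < m.
--             u = t + 2
--             while u < m and segs[u] != '':
--                 u += 1
--             if u < m:
--                 out.append('$$' + '$'.join(segs[t + 1:u]) + '$$')
--                 out.append(segs[u + 1])
--                 t = u + 2
--             else:
--                 out.append('$')
--                 t += 1
--         elif t == m:
--             out.append('$' + q)
--             t += 1
--         else:
--             out.append('\\(' + q + '\\)')
--             out.append(segs[t + 1])
--             t += 2
--     return ''.join(out)
-- ===== Notes on version B (the rewrite author's own statement) =====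
-- stated objective: alternative
-- what changed: Instead of a character-indexed scan that calls str.find ahead for each delimiter, B splits the text once on '$' and runs a state walk over the resulting segment list (an empty interior segment is exactly an adjacent '$$' pair), reassembling the output from whole segments.
import Mathlib
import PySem

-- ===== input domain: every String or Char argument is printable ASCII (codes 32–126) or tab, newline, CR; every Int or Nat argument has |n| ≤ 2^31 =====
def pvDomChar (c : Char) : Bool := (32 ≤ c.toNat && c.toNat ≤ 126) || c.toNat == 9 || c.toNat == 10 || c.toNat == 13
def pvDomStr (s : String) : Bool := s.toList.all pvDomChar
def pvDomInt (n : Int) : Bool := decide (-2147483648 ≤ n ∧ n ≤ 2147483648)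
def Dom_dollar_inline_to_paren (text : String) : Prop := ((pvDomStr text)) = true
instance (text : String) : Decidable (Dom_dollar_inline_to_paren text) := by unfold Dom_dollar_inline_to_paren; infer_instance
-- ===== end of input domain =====

-- B changes the algorithm: one split('$') and a walk over the segment list instead of a
-- character-indexed scan with str.find; same exact output (objective: alternative).

-- ===== PORT A =====

-- port of A's while loop: index i over the characters, out = list of appended pieces;
-- fuel only makes the recursion structural (每 step advances i, so length+1 steps suffice)
def aLoop : Nat → List Char → Nat → List (List Char) → List (List Char)
  | 0, _, _, out => out
  | fuel + 1, s, i, out =>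
    if hi : i < s.length then
      -- text.startswith("$$", i)
      if PySem.Chars.startswith (List.drop i s) ['$', '$'] = true then
        -- j = text.find("$$", i + 2)
        let j := PySem.Chars.findFrom s ['$', '$'] ((i : Int) + 2) none
        if j < 0 then
          aLoop fuel s (i + 1) (out ++ [[s[i]]])
        else
          -- out.append(text[i : j + 2]); i = j + 2
          aLoop fuel s (j.toNat + 2) (out ++ [PySem.List.slice s (some (i : Int)) (some (j + 2))])
      else if s[i] = '$' then
        -- j = text.find("$", i + 1)
        let j := PySem.Chars.findFrom s ['$'] ((i : Int) + 1) none
        if j < 0 then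
          aLoop fuel s (i + 1) (out ++ [[s[i]]])
        else
          -- out.append("\\(" + text[i + 1 : j] + "\\)"); i = j + 1
          aLoop fuel s (j.toNat + 1)
            (out ++ [['\\', '('] ++ PySem.List.slice s (some ((i : Int) + 1)) (some j) ++ ['\\', ')']])
      else
        aLoop fuel s (i + 1) (out ++ [[s[i]]])
    else out

def dollar_inline_to_paren (text : String) : String :=
  String.ofList (PySem.Chars.join [] (aLoop (text.toList.length + 1) text.toList 0 []))

-- ===== PORT B =====

-- port of B's inner scan: u = t+2; while u < m and segs[u] != '': u += 1  (fuel m+1 covers the loop)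
def bScan : Nat → List (List Char) → Nat → Nat → Nat
  | 0, _, _, u => u
  | fuel + 1, segs, m, u =>
    if u < m ∧ segs.getD u [] ≠ [] then bScan fuel segs m (u + 1) else u

-- port of B's while loop over the segment index t (1 ≤ t ≤ m); segs.getD never uses its
-- default: every index taken is in range, as in the Python; fuel length+1 covers the loop
def bLoop : Nat → List (List Char) → Nat → Nat → List (List Char) → List (List Char)
  | 0, _, _, _, out => out
  | fuel + 1, segs, m, t, out =>
    if t ≤ m then
      let q := segs.getD t []
      if q = [] ∧ t < m then
        let u := bScan (m + 1) segs m (t + 2)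
        if u < m then
          bLoop fuel segs m (u + 2)
            (out ++ [['$', '$'] ++ PySem.Chars.join ['$'] (PySem.List.slice segs (some ((t : Int) + 1)) (some (u : Int))) ++ ['$', '$'],
                     segs.getD (u + 1) []])
        else
          bLoop fuel segs m (t + 1) (out ++ [['$']])
      else if t = m then
        bLoop fuel segs m (t + 1) (out ++ [['$'] ++ q])
      else
        bLoop fuel segs m (t + 2) (out ++ [['\\', '('] ++ q ++ ['\\', ')'], segs.getD (t + 1) []])
    else out

def dollar_inline_to_paren_alt (text : String) : String :=
  let segs := PySem.Chars.splitOn text.toList ['$']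
  String.ofList (PySem.Chars.join [] (bLoop (segs.length + 1) segs (segs.length - 1) 1 [segs.headD []]))

-- ===== PRECONDITION & SPEC =====
def Spec_dollar_inline_to_paren (text : String) (out : String) : Prop := out = dollar_inline_to_paren_alt text
instance (text : String) (out : String) : Decidable (Spec_dollar_inline_to_paren text out) := by unfold Spec_dollar_inline_to_paren; infer_instance

-- ===== CLAIM (what is proved, stated in full; the proofs are below) =====
def Claim_equal_dollar_inline_to_paren : Prop := ∀ (text : String), Dom_dollar_inline_to_paren text → Spec_dollar_inline_to_paren text (dollar_inline_to_paren text)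

-- ===== LEMMAS AND PROOFS =====

-- reference recursion: A's scan rewritten on the suffix of the text
def Arec (s : List Char) : List Char :=
  match s with
  | [] => []
  | c :: t =>
    if ['$', '$'] <+: c :: t then
      let j := PySem.Chars.find (t.drop 1) ['$', '$']
      if j < 0 then c :: Arec t
      else List.take (j.toNat + 4) (c :: t) ++ Arec (List.drop (j.toNat + 4) (c :: t))
    else if c = '$' then
      let j := PySem.Chars.find t ['$']
      if j < 0 then c :: Arec t
      else ['\\', '('] ++ t.take j.toNat ++ ['\\', ')'] ++ Arec (t.drop (j.toNat + 1))
    else c :: Arec t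
  termination_by s.length
  decreasing_by all_goals (simp only [List.length_cons, List.length_drop]; omega)

-- the text that remains when the walk stands on the dollar preceding the segments qs
def Dtail (qs : List (List Char)) : List Char :=
  match qs with
  | [] => []
  | _ => '$' :: List.intercalate ['$'] qs

theorem pvArecNil : Arec [] = [] := by rw [Arec]

-- structural version of the close-'$$' scan: peel segments until the first interior empty one
def scanClose : List (List Char) → Option (List Char × List (List Char))
  | [] => none
  | [_] => none
  | p :: q :: rest =>
    if q = [] ∧ rest ≠ [] then some (p, rest)
    else (scanClose (q :: rest)).map fun pr => (p ++ '$' :: pr.1, pr.2)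

theorem pvInterNil (l : List (List Char)) : List.intercalate ([] : List Char) l = l.flatten := by
  induction l with
  | nil => simp [List.intercalate]
  | cons a tl ih =>
    cases tl with
    | nil => simp [List.intercalate, List.intersperse_single]
    | cons b t =>
      rw [List.flatten_cons, ← ih]
      simp [List.intercalate, List.intersperse_cons₂]

theorem pvStartswith_len (s : List Char) (i : Nat)
    (h : PySem.Chars.startswith (List.drop i s) ['$', '$'] = true) : i + 2 ≤ s.length := by
  have hp := (PySem.Chars.startswith_iff _ _).mp h
  have := hp.length_le
  simp at this
  omega

theorem pvBScan_ge (segs : List (List Char)) (m : Nat) :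
    ∀ fuel u, u ≤ bScan fuel segs m u := by
  intro fuel
  induction fuel with
  | zero => intro u; exact le_refl u
  | succ f ih =>
    intro u
    rw [bScan]
    split
    · exact le_trans (Nat.le_succ u) (ih (u + 1))
    · exact le_refl u

theorem pvBScan_high (segs : List (List Char)) (m : Nat) (fuel u : Nat) (h : ¬ u < m) :
    bScan fuel segs m u = u := by
  cases fuel with
  | zero => rfl
  | succ f => rw [bScan, if_neg (by rintro ⟨h1, _⟩; exact h h1)]

theorem pvBScanCongr (segs : List (List Char)) (m : Nat) :
    ∀ f1 f2 u, m ≤ u + f1 → m ≤ u + f2 → bScan f1 segs m u = bScan f2 segs m u := by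
  intro f1
  induction f1 with
  | zero =>
    intro f2 u h1 h2
    rw [show bScan 0 segs m u = u from rfl, pvBScan_high segs m f2 u (by omega)]
  | succ f ih =>
    intro f2 u h1 h2
    by_cases hc : u < m ∧ segs.getD u [] ≠ []
    · cases f2 with
      | zero => exact absurd hc.1 (by omega)
      | succ f2' =>
        rw [bScan, if_pos hc, bScan, if_pos hc]
        exact ih f2' (u + 1) (by omega) (by omega)
    · have hl : bScan (f + 1) segs m u = u := by rw [bScan, if_neg hc]
      have hr : bScan f2 segs m u = u := by
        cases f2 with
        | zero => rfl
        | succ f2' => rw [bScan, if_neg hc]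
      rw [hl, hr]

theorem pvJoinNil (l : List (List Char)) : PySem.Chars.join [] l = l.flatten := by
  simp only [PySem.Chars.join]
  exact pvInterNil l

theorem pvJoin1 (out : List (List Char)) (x : List Char) :
    PySem.Chars.join [] (out ++ [x]) = PySem.Chars.join [] out ++ x := by
  simp [pvJoinNil]

theorem pvJoin2 (out : List (List Char)) (x y : List Char) :
    PySem.Chars.join [] (out ++ [x, y]) = PySem.Chars.join [] out ++ x ++ y := by
  simp [pvJoinNil, List.append_assoc]

theorem pvIntercalate_cons {α : Type} (sep a : List α) (tl : List (List α)) (h : tl ≠ []) :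
    List.intercalate sep (a :: tl) = a ++ sep ++ List.intercalate sep tl := by
  cases tl with
  | nil => exact absurd rfl h
  | cons b t => simp [List.intercalate, List.intersperse_cons₂]

theorem pvIntercalate_single {α : Type} (sep a : List α) : List.intercalate sep [a] = a := by
  simp [List.intercalate, List.intersperse_single]

theorem pvHeadTail (qs : List (List Char)) (p : List Char) (tl : List (List Char)) (h : qs = p :: tl) :
    List.intercalate ['$'] qs = p ++ Dtail tl := by
  subst h
  cases tl with
  | nil => simp [Dtail, pvIntercalate_single]
  | cons b t =>
    rw [pvIntercalate_cons _ _ _ (by simp)]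
    simp [Dtail]

theorem pvPrefixPair (l : List Char) : (['$', '$'] <+: l) ↔ ∃ t, l = '$' :: '$' :: t := by
  constructor
  · rintro ⟨t, rfl⟩; exact ⟨t, by simp⟩
  · rintro ⟨t, rfl⟩; exact ⟨t, by simp⟩

theorem pvPrefixSingle (c : Char) (l : List Char) : ([c] <+: l) ↔ ∃ t, l = c :: t := by
  constructor
  · rintro ⟨t, rfl⟩; exact ⟨t, by simp⟩
  · rintro ⟨t, rfl⟩; exact ⟨t, by simp⟩

theorem pvFindEq (s sub : List Char) (k : Nat) (_hk : k ≤ s.length)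
    (h1 : sub <+: List.drop k s) (h2 : ∀ i < k, ¬ sub <+: List.drop i s) :
    PySem.Chars.find s sub = (k : Int) := by
  have hinf : sub <:+: s := h1.isInfix.trans (List.drop_suffix k s).isInfix
  have h0 : 0 ≤ PySem.Chars.find s sub := (PySem.Chars.find_nonneg_iff s sub).mpr hinf
  obtain ⟨hpre, hmin⟩ := PySem.Chars.find_spec h0
  rcases Nat.lt_trichotomy (PySem.Chars.find s sub).toNat k with hlt | heq | hgt
  · exact absurd hpre (h2 _ hlt)
  · omega
  · exact absurd h1 (hmin k hgt)

theorem pvFindNoDollar (p : List Char) (h : '$' ∉ p) : PySem.Chars.find p ['$'] = -1 := by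
  rw [PySem.Chars.find_eq_neg_one_iff]
  intro hinf
  exact h (hinf.sublist.subset (by simp))

theorem pvFindDDNoDollar (p : List Char) (h : '$' ∉ p) : PySem.Chars.find p ['$', '$'] = -1 := by
  rw [PySem.Chars.find_eq_neg_one_iff]
  intro hinf
  exact h (hinf.sublist.subset (by simp))

theorem pvFindFirstDollar (p r : List Char) (h : '$' ∉ p) :
    PySem.Chars.find (p ++ '$' :: r) ['$'] = (p.length : Int) := by
  apply pvFindEq _ _ p.length (by simp)
  · rw [List.drop_left]
    exact (pvPrefixSingle _ _).mpr ⟨r, rfl⟩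
  · intro i hi hpre
    obtain ⟨t, ht⟩ := (pvPrefixSingle _ _).mp hpre
    have h1 : ((p ++ '$' :: r).drop i).head? = some '$' := by rw [ht]; rfl
    rw [List.head?_drop, List.getElem?_append_left hi, List.getElem?_eq_getElem hi] at h1
    exact h ((Option.some.inj h1) ▸ List.getElem_mem hi)

theorem pvFindDDAt (p Y : List Char) (h : '$' ∉ p) :
    PySem.Chars.find (p ++ '$' :: '$' :: Y) ['$', '$'] = (p.length : Int) := by
  apply pvFindEq _ _ p.length (by simp)
  · rw [List.drop_left]
    exact (pvPrefixPair _).mpr ⟨Y, rfl⟩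
  · intro i hi hpre
    obtain ⟨t, ht⟩ := (pvPrefixPair _).mp hpre
    have h1 : ((p ++ '$' :: '$' :: Y).drop i).head? = some '$' := by rw [ht]; rfl
    rw [List.head?_drop, List.getElem?_append_left hi, List.getElem?_eq_getElem hi] at h1
    exact h ((Option.some.inj h1) ▸ List.getElem_mem hi)

theorem pvNoDDBelow (p X : List Char) (h : '$' ∉ p) (hX : X.head? ≠ some '$') :
    ∀ i, i ≤ p.length → ¬ ['$', '$'] <+: (p ++ '$' :: X).drop i := by
  intro i hi hpre
  obtain ⟨t, ht⟩ := (pvPrefixPair _).mp hpre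
  rcases Nat.lt_or_ge i p.length with hlt | hge
  · have h1 : ((p ++ '$' :: X).drop i).head? = some '$' := by rw [ht]; rfl
    rw [List.head?_drop, List.getElem?_append_left hlt, List.getElem?_eq_getElem hlt] at h1
    exact h ((Option.some.inj h1) ▸ List.getElem_mem hlt)
  · have hie : i = p.length := le_antisymm hi hge
    subst hie
    rw [List.drop_left] at ht
    have : X = '$' :: t := by injection ht
    exact hX (by rw [this]; rfl)

theorem pvDropHigh (p X : List Char) (i : Nat) (hi : p.length < i) :
    (p ++ '$' :: X).drop i = X.drop (i - p.length - 1) := by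
  rw [List.drop_append, List.drop_eq_nil_of_le (by omega),
      show i - p.length = (i - p.length - 1) + 1 by omega, List.drop_succ_cons]
  simp

theorem pvFindDDStep (p X : List Char) (h : '$' ∉ p) (hX : X.head? ≠ some '$') :
    PySem.Chars.find (p ++ '$' :: X) ['$', '$'] =
      if PySem.Chars.find X ['$', '$'] = -1 then -1
      else (p.length : Int) + 1 + PySem.Chars.find X ['$', '$'] := by
  by_cases hx : PySem.Chars.find X ['$', '$'] = -1
  · rw [if_pos hx, PySem.Chars.find_eq_neg_one_iff]
    intro hinf
    obtain ⟨j, hj⟩ := (PySem.Chars.exists_prefix_drop_iff_isIn _ _).mpr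
      ((PySem.Chars.isIn_iff_infix _ _).mpr hinf)
    rcases Nat.lt_or_ge j (p.length + 1) with hle | hgt
    · exact pvNoDDBelow p X h hX j (by omega) hj
    · rw [pvDropHigh p X j (by omega)] at hj
      rw [PySem.Chars.find_eq_neg_one_iff] at hx
      exact hx ((PySem.Chars.isIn_iff_infix _ _).mp
        ((PySem.Chars.exists_prefix_drop_iff_isIn _ _).mp ⟨_, hj⟩))
  · rw [if_neg hx]
    have h0 : 0 ≤ PySem.Chars.find X ['$', '$'] := by
      have := PySem.Chars.neg_one_le_find X ['$', '$']
      omega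
    obtain ⟨hpre, hmin⟩ := PySem.Chars.find_spec h0
    have hlen := PySem.Chars.find_le_length X ['$', '$']
    have heq := pvFindEq (p ++ '$' :: X) ['$', '$']
      (p.length + 1 + (PySem.Chars.find X ['$', '$']).toNat)
      (by simp; omega)
      (by rw [pvDropHigh p X _ (by omega), show p.length + 1 + (PySem.Chars.find X ['$', '$']).toNat - p.length - 1 = (PySem.Chars.find X ['$', '$']).toNat by omega]
          exact hpre)
      (by intro i hilt hip
          rcases Nat.lt_or_ge i (p.length + 1) with hle | hgt
          · exact pvNoDDBelow p X h hX i (by omega) hip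
          · rw [pvDropHigh p X i (by omega)] at hip
            exact hmin (i - p.length - 1) (by omega) hip)
    rw [heq]
    push_cast
    omega

theorem pvInterNilNil : List.intercalate ['$'] ([] : List (List Char)) = [] := by
  simp [List.intercalate]

theorem pvFindDDNil : PySem.Chars.find [] ['$', '$'] = -1 := by decide

theorem pvInterHead (q : List Char) (rr : List (List Char)) (hq : '$' ∉ q)
    (hcond : ¬ (q = [] ∧ rr ≠ [])) :
    (List.intercalate ['$'] (q :: rr)).head? ≠ some '$' := by
  cases q with
  | nil =>
    have hrr : rr = [] := by
      by_contra hne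
      exact hcond ⟨rfl, hne⟩
    subst hrr
    rw [pvIntercalate_single]
    simp
  | cons c q' =>
    rw [pvHeadTail _ _ _ rfl]
    simp only [List.cons_append, List.head?_cons, ne_eq, Option.some.injEq]
    exact fun hce => hq (by simp [hce])

theorem pvSC_none (rest : List (List Char)) :
    (∀ p ∈ rest, '$' ∉ p) → scanClose rest = none →
    PySem.Chars.find (List.intercalate ['$'] rest) ['$', '$'] = -1 := by
  induction rest with
  | nil =>
    intro _ _
    rw [pvInterNilNil]; exact pvFindDDNil
  | cons p tail ih =>
    intro hf h
    rcases tail with _ | ⟨q, rr⟩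
    · rw [pvIntercalate_single]; exact pvFindDDNoDollar p (hf p (by simp))
    · simp only [scanClose] at h
      by_cases hb : q = [] ∧ rr ≠ []
      · rw [if_pos hb] at h; simp at h
      · rw [if_neg hb] at h
        have hsc : scanClose (q :: rr) = none := by
          cases hx : scanClose (q :: rr) with
          | none => rfl
          | some pr => rw [hx] at h; simp at h
        have ihv := ih (fun x hx => hf x (List.mem_cons_of_mem _ hx)) hsc
        rw [pvIntercalate_cons _ _ _ (by simp), List.append_assoc, List.singleton_append,
          pvFindDDStep p _ (hf p (by simp)) (pvInterHead q rr (hf q (by simp)) hb)]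
        simp [ihv]

theorem pvSC_some (rest : List (List Char)) :
    ∀ (mid : List Char) (rem : List (List Char)), (∀ p ∈ rest, '$' ∉ p) →
      scanClose rest = some (mid, rem) →
    List.intercalate ['$'] rest = mid ++ '$' :: '$' :: List.intercalate ['$'] rem ∧
      PySem.Chars.find (List.intercalate ['$'] rest) ['$', '$'] = (mid.length : Int) ∧ rem ≠ [] := by
  induction rest with
  | nil => intro mid rem _ h; simp [scanClose] at h
  | cons p tail ih =>
    intro mid rem hf h
    rcases tail with _ | ⟨q, rr⟩
    · simp [scanClose] at h
    · simp only [scanClose] at h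
      by_cases hb : q = [] ∧ rr ≠ []
      · rw [if_pos hb] at h
        have hinj := Option.some.inj h
        have hp : mid = p := (congrArg Prod.fst hinj).symm
        have hr : rem = rr := (congrArg Prod.snd hinj).symm
        subst hp; subst hr
        obtain ⟨hq, hrr⟩ := hb
        subst hq
        have hdec : List.intercalate ['$'] (mid :: ([] : List Char) :: rem) =
            mid ++ '$' :: '$' :: List.intercalate ['$'] rem := by
          rw [pvIntercalate_cons _ _ _ (by simp), pvIntercalate_cons _ _ _ hrr]
          simp
        refine ⟨hdec, ?_, hrr⟩
        rw [hdec]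
        exact pvFindDDAt mid _ (hf mid (by simp))
      · rw [if_neg hb] at h
        cases hx : scanClose (q :: rr) with
        | none => rw [hx] at h; simp at h
        | some pr =>
          obtain ⟨pr1, pr2⟩ := pr
          rw [hx] at h
          simp only [Option.map_some] at h
          have hinj := Option.some.inj h
          have hm : mid = p ++ '$' :: pr1 := (congrArg Prod.fst hinj).symm
          have hr : rem = pr2 := (congrArg Prod.snd hinj).symm
          subst hm; subst hr
          obtain ⟨ihEq, ihFind, ihNe⟩ :=
            ih pr1 rem (fun x hx' => hf x (List.mem_cons_of_mem _ hx')) hx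
          have hdec : List.intercalate ['$'] (p :: q :: rr) =
              (p ++ '$' :: pr1) ++ '$' :: '$' :: List.intercalate ['$'] rem := by
            rw [pvIntercalate_cons _ _ _ (by simp), ihEq]
            simp
          refine ⟨hdec, ?_, ihNe⟩
          rw [pvIntercalate_cons _ _ _ (by simp), List.append_assoc, List.singleton_append,
            pvFindDDStep p _ (hf p (by simp)) (pvInterHead q rr (hf q (by simp)) hb), ihFind]
          have hlen0 : (0 : Int) ≤ (pr1.length : Int) := by positivity
          rw [if_neg (by omega)]
          simp
          ring

theorem pvArecCopy (p X : List Char) (h : '$' ∉ p) : Arec (p ++ X) = p ++ Arec X := by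
  induction p with
  | nil => simp
  | cons c p' ih =>
    have hc : c ≠ '$' := fun he => h (by simp [he])
    have hnp : ¬ (['$', '$'] <+: c :: (p' ++ X)) := by
      rw [pvPrefixPair]
      rintro ⟨t, ht⟩
      exact hc (by injection ht)
    rw [List.cons_append, Arec]
    simp only [hnp, if_false, hc]
    rw [ih (fun hm => h (by simp [hm]))]
    rfl

theorem pvArecDollar (q : List Char) (h : '$' ∉ q) : Arec ('$' :: q) = '$' :: q := by
  have hnp : ¬ (['$', '$'] <+: '$' :: q) := by
    rw [pvPrefixPair]
    rintro ⟨t, ht⟩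
    have : q = '$' :: t := by injection ht
    exact h (by rw [this]; simp)
  have hfq : PySem.Chars.find q ['$'] = -1 := pvFindNoDollar q h
  rw [Arec]
  simp only [hnp, if_false, hfq]
  norm_num
  have : Arec (q ++ []) = q ++ Arec [] := pvArecCopy q [] h
  simp [Arec] at this
  simp [this]

theorem pvSCBI (segs : List (List Char)) (m t : Nat) (hm : m + 1 = segs.length) (ht : t < m) :
    (bScan (m + 1) segs m (t + 2) < m →
      scanClose (segs.drop (t + 1)) =
        some (List.intercalate ['$'] ((segs.drop (t + 1)).take (bScan (m + 1) segs m (t + 2) - (t + 1))),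
              segs.drop (bScan (m + 1) segs m (t + 2) + 1))) ∧
    (¬ bScan (m + 1) segs m (t + 2) < m → scanClose (segs.drop (t + 1)) = none) := by
  have hd1 : segs.drop (t + 1) = segs[t + 1]'(by omega) :: segs.drop (t + 2) :=
    List.drop_eq_getElem_cons (by omega)
  by_cases h2 : t + 2 < m
  · have hd2 : segs.drop (t + 2) = segs[t + 2]'(by omega) :: segs.drop (t + 3) :=
      List.drop_eq_getElem_cons (by omega)
    have hgd : segs.getD (t + 2) [] = segs[t + 2]'(by omega) := List.getD_eq_getElem segs [] (by omega)
    by_cases hbe : segs.getD (t + 2) [] = []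
    · have hr : bScan (m + 1) segs m (t + 2) = t + 2 := by
        rw [bScan, if_neg (by rintro ⟨_, hb⟩; exact hb hbe)]
      rw [hr]
      have hd3ne : segs.drop (t + 3) ≠ [] := by
        intro hcon
        have := congrArg List.length hcon
        simp at this
        omega
      constructor
      · intro _
        rw [hd1, hd2]
        simp only [scanClose]
        rw [if_pos ⟨by rw [← hgd, hbe], hd3ne⟩]
        rw [show t + 2 - (t + 1) = 1 by omega]
        rw [List.take_succ_cons, List.take_zero, pvIntercalate_single]
      · intro hn
        omega
    · have hr : bScan (m + 1) segs m (t + 2) = bScan (m + 1) segs m (t + 3) := by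
        rw [bScan, if_pos ⟨h2, hbe⟩]
        exact pvBScanCongr segs m m (m + 1) (t + 3) (by omega) (by omega)
      have ih := pvSCBI segs m (t + 1) hm (by omega)
      simp only [show t + 1 + 2 = t + 3 from rfl, show t + 1 + 1 = t + 2 from rfl] at ih
      rw [hr]
      have hbne : segs[t + 2]'(by omega) ≠ [] := by rw [← hgd]; exact hbe
      have hcond : ¬ (segs[t + 2]'(by omega) = [] ∧ segs.drop (t + 3) ≠ []) := by
        intro hcon
        exact hbne hcon.1
      have hscan : scanClose (segs.drop (t + 1)) =
          (scanClose (segs.drop (t + 2))).map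
            (fun pr => (segs[t + 1]'(by omega) ++ '$' :: pr.1, pr.2)) := by
        rw [hd1, hd2]
        simp only [scanClose]
        rw [if_neg hcond, ← hd2]
      constructor
      · intro hlt
        have hsome := ih.1 hlt
        rw [hscan, hsome]
        simp only [Option.map_some, Option.some.injEq]
        have hge3 : t + 3 ≤ bScan (m + 1) segs m (t + 3) := pvBScan_ge segs m (m + 1) (t + 3)
        have htake : (segs.drop (t + 1)).take (bScan (m + 1) segs m (t + 3) - (t + 1)) =
            segs[t + 1]'(by omega) :: (segs.drop (t + 2)).take (bScan (m + 1) segs m (t + 3) - (t + 2)) := by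
          rw [hd1, show bScan (m + 1) segs m (t + 3) - (t + 1) = (bScan (m + 1) segs m (t + 3) - (t + 2)) + 1 by omega,
            List.take_succ_cons]
        have htkne : (segs.drop (t + 2)).take (bScan (m + 1) segs m (t + 3) - (t + 2)) ≠ [] := by
          intro hcon
          have := congrArg List.length hcon
          simp at this
          omega
        simp only [Prod.mk.injEq]
        refine ⟨?_, trivial⟩
        rw [htake, pvIntercalate_cons _ _ _ htkne]
        simp
      · intro hn
        rw [hscan, ih.2 hn]
        rfl
  · have hr : bScan (m + 1) segs m (t + 2) = t + 2 := by
      rw [bScan, if_neg (by omega)]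
    rw [hr]
    refine ⟨by intro hlt; omega, ?_⟩
    intro _
    have hlen : (segs.drop (t + 1)).length = m - t := by simp; omega
    rcases hdl : segs.drop (t + 1) with _ | ⟨a, _ | ⟨b, _ | ⟨c, z⟩⟩⟩
    · rw [hdl] at hlen; simp at hlen; omega
    · simp [scanClose]
    · simp [scanClose]
    · rw [hdl] at hlen
      simp at hlen
      omega
  termination_by m - t

theorem pvML (segs : List (List Char)) (hf : ∀ p ∈ segs, '$' ∉ p) (hne : segs ≠ []) :
    ∀ fuel t out, 1 ≤ t → segs.length - t < fuel →
    PySem.Chars.join [] (bLoop fuel segs (segs.length - 1) t out) =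
      PySem.Chars.join [] out ++ Arec (Dtail (segs.drop t)) := by
  have hm : segs.length - 1 + 1 = segs.length := by
    have : 0 < segs.length := List.length_pos_of_ne_nil hne
    omega
  set m := segs.length - 1 with hmdef
  intro fuel
  induction fuel with
  | zero => intro t out _ h0; exact absurd h0 (by omega)
  | succ fl ih =>
  intro t out h1 hfe
  by_cases ht : t ≤ m
  · have htlen : t < segs.length := by omega
    have hdt : segs.drop t = segs[t] :: segs.drop (t + 1) := List.drop_eq_getElem_cons htlen
    have hq : segs.getD t [] = segs[t] := List.getD_eq_getElem segs [] htlen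
    have hfq : '$' ∉ segs[t] := hf _ (List.getElem_mem htlen)
    rw [bLoop, if_pos ht]
    simp only [hq]
    by_cases hb : segs[t] = ([] : List Char) ∧ t < m
    · rw [if_pos hb]
      have ht1len : t + 1 < segs.length := by omega
      have hd1 : segs.drop (t + 1) = segs[t + 1] :: segs.drop (t + 2) :=
        List.drop_eq_getElem_cons ht1len
      have hrestne : segs.drop (t + 1) ≠ [] :=
        fun hcon => absurd (congrArg List.length hcon) (by simp; omega)
      set X := List.intercalate ['$'] (segs.drop (t + 1)) with hX
      have hDt : Dtail (segs.drop t) = '$' :: '$' :: X := by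
        rw [hdt, hb.1, hX]
        simp only [Dtail]
        rw [pvIntercalate_cons _ _ _ hrestne]
        simp
      have hfrest : ∀ p ∈ segs.drop (t + 1), '$' ∉ p := fun p hp => hf p (List.mem_of_mem_drop hp)
      have hscbi := pvSCBI segs m t (by omega) hb.2
      by_cases hu : bScan (m + 1) segs m (t + 2) < m
      · rw [if_pos hu]
        set r := bScan (m + 1) segs m (t + 2) with hrdef
        have hge : t + 2 ≤ r := pvBScan_ge segs m (m + 1) (t + 2)
        have hsc := hscbi.1 hu
        set MID := List.intercalate ['$'] ((segs.drop (t + 1)).take (r - (t + 1))) with hMID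
        obtain ⟨hXeq, hfind, hremne⟩ :=
          pvSC_some (segs.drop (t + 1)) MID (segs.drop (r + 1)) hfrest hsc
        have hr1len : r + 1 < segs.length := by omega
        have hdrem : segs.drop (r + 1) = segs[r + 1] :: segs.drop (r + 2) :=
          List.drop_eq_getElem_cons hr1len
        have hA : Arec ('$' :: '$' :: X) =
            (['$', '$'] ++ MID ++ ['$', '$']) ++ Arec (List.intercalate ['$'] (segs.drop (r + 1))) := by
          rw [Arec]
          rw [if_pos ((pvPrefixPair _).mpr ⟨X, rfl⟩)]
          simp only [List.drop_succ_cons, List.drop_zero]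
          rw [← hX] at hfind
          rw [hfind]
          rw [if_neg (by omega)]
          have hjt : ((MID.length : Int)).toNat = MID.length := by simp
          rw [hjt]
          have hR : X = MID ++ '$' :: '$' :: List.intercalate ['$'] (segs.drop (r + 1)) := by
            rw [hX]; exact hXeq
          have htk : List.take (MID.length + 4) ('$' :: '$' :: X) =
              ['$', '$'] ++ MID ++ ['$', '$'] := by
            rw [show (('$' : Char) :: '$' :: X) =
                (['$', '$'] ++ MID ++ ['$', '$']) ++ List.intercalate ['$'] (segs.drop (r + 1)) by
              rw [hR]; simp]
            rw [show MID.length + 4 = (['$', '$'] ++ MID ++ ['$', '$']).length by simp <;> omega]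
            exact List.take_left
          have hdr : List.drop (MID.length + 2) X =
              List.intercalate ['$'] (segs.drop (r + 1)) := by
            rw [hR, pvDropHigh MID _ (MID.length + 2) (Nat.lt_add_of_pos_right (by norm_num))]
            rw [show MID.length + 2 - MID.length - 1 = 1 by omega]
            simp
          rw [htk, hdr]
        have hAc : Arec (List.intercalate ['$'] (segs.drop (r + 1))) =
            segs[r + 1] ++ Arec (Dtail (segs.drop (r + 2))) := by
          rw [pvHeadTail _ _ _ hdrem, pvArecCopy _ _ (hf _ (List.getElem_mem hr1len))]
        have hslice : PySem.List.slice segs (some ((t : Int) + 1)) (some (r : Int)) =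
            (segs.drop (t + 1)).take (r - (t + 1)) := by
          rw [show ((t : Int) + 1) = ((t + 1 : Nat) : Int) by push_cast; ring]
          exact PySem.List.slice_natCast segs (t + 1) r
        have ihv := ih (r + 2)
          (out ++ [['$', '$'] ++ PySem.Chars.join ['$'] (PySem.List.slice segs (some ((t : Int) + 1)) (some (r : Int))) ++ ['$', '$'],
                   segs.getD (r + 1) []]) (by omega) (by omega)
        rw [ihv, pvJoin2, hDt, hA, hAc]
        rw [hslice]
        simp only [PySem.Chars.join, ← hMID]
        rw [List.getD_eq_getElem segs [] hr1len]
        simp [List.append_assoc]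
      · rw [if_neg hu]
        have hnone := hscbi.2 hu
        have hfindX : PySem.Chars.find X ['$', '$'] = -1 := by
          rw [hX]; exact pvSC_none _ hfrest hnone
        have hA : Arec ('$' :: '$' :: X) = '$' :: Arec ('$' :: X) := by
          rw [Arec]
          rw [if_pos ((pvPrefixPair _).mpr ⟨X, rfl⟩)]
          simp only [List.drop_succ_cons, List.drop_zero]
          rw [hfindX]
          rw [if_pos (by norm_num)]
        have hDrest : Dtail (segs.drop (t + 1)) = '$' :: X := by
          rw [hd1, hX, hd1]
          simp [Dtail]
        have ihv := ih (t + 1) (out ++ [['$']]) (by omega) (by omega)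
        rw [ihv, pvJoin1, hDt, hA, hDrest]
        simp
    · rw [if_neg hb]
      by_cases htm : t = m
      · rw [if_pos htm]
        have hdropnil : segs.drop (t + 1) = [] := List.drop_eq_nil_of_le (by omega)
        have hDt : Dtail (segs.drop t) = '$' :: segs[t] := by
          rw [hdt, hdropnil]
          simp [Dtail, pvIntercalate_single]
        have ihv := ih (t + 1) (out ++ [['$'] ++ segs[t]]) (by omega) (by omega)
        rw [ihv, pvJoin1, hDt, pvArecDollar _ hfq]
        rw [show segs.drop (t + 1) = [] from hdropnil]
        simp [Dtail, pvArecNil]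
      · rw [if_neg htm]
        have htm' : t < m := by omega
        have hqne : segs[t] ≠ [] := fun hqe => hb ⟨hqe, htm'⟩
        have ht1len : t + 1 < segs.length := by omega
        have hd1 : segs.drop (t + 1) = segs[t + 1] :: segs.drop (t + 2) :=
          List.drop_eq_getElem_cons ht1len
        have hrestne : segs.drop (t + 1) ≠ [] :=
        fun hcon => absurd (congrArg List.length hcon) (by simp; omega)
        set X := List.intercalate ['$'] (segs.drop (t + 1)) with hX
        have hDt : Dtail (segs.drop t) = '$' :: (segs[t] ++ '$' :: X) := by
          rw [hdt, hX]
          simp only [Dtail]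
          rw [pvIntercalate_cons _ _ _ hrestne]
          simp
        obtain ⟨c0, q', hq0⟩ := List.exists_cons_of_ne_nil hqne
        have hc0 : c0 ≠ '$' := fun he => hfq (by rw [hq0, he]; simp)
        have hnp : ¬ (['$', '$'] <+: '$' :: (segs[t] ++ '$' :: X)) := by
          rw [pvPrefixPair]
          rintro ⟨tt, htt⟩
          have h2 : segs[t] ++ '$' :: X = '$' :: tt := by injection htt
          rw [hq0, List.cons_append] at h2
          exact hc0 (by injection h2)
        have hfind := pvFindFirstDollar segs[t] X hfq
        have hA : Arec ('$' :: (segs[t] ++ '$' :: X)) =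
            ['\\', '('] ++ segs[t] ++ ['\\', ')'] ++ Arec X := by
          rw [Arec, if_neg hnp, if_pos rfl, hfind, if_neg (by omega)]
          have hjt : ((segs[t].length : Int)).toNat = segs[t].length := by simp
          rw [hjt, List.take_left, pvDropHigh segs[t] X (segs[t].length + 1) (by omega)]
          simp
        have hAc : Arec X = segs[t + 1] ++ Arec (Dtail (segs.drop (t + 2))) := by
          rw [hX, pvHeadTail _ _ _ hd1, pvArecCopy _ _ (hf _ (List.getElem_mem ht1len))]
        have ihv := ih (t + 2)
          (out ++ [['\\', '('] ++ segs[t] ++ ['\\', ')'], segs.getD (t + 1) []]) (by omega) (by omega)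
        rw [ihv, pvJoin2, hDt, hA, hAc, List.getD_eq_getElem segs [] ht1len]
        simp [List.append_assoc]
  · rw [bLoop, if_neg ht]
    rw [show segs.drop t = [] from List.drop_eq_nil_of_le (by omega)]
    simp [Dtail, pvArecNil]

theorem pvL1 (s : List Char) :
    ∀ fuel i out, s.length - i < fuel →
    PySem.Chars.join [] (aLoop fuel s i out) = PySem.Chars.join [] out ++ Arec (List.drop i s) := by
  intro fuel
  induction fuel with
  | zero => intro i out h0; exact absurd h0 (by omega)
  | succ fl ih =>
  intro i out hfe
  by_cases hi : i < s.length
  · rw [aLoop, dif_pos hi]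
    have hdt : s.drop i = s[i] :: s.drop (i + 1) := List.drop_eq_getElem_cons hi
    by_cases hss : PySem.Chars.startswith (s.drop i) ['$', '$'] = true
    · rw [if_pos hss]
      have hpre : ['$', '$'] <+: s.drop i := (PySem.Chars.startswith_iff _ _).mp hss
      have hpre' : ['$', '$'] <+: s[i] :: s.drop (i + 1) := by rw [← hdt]; exact hpre
      have hk : i + 2 ≤ s.length := pvStartswith_len s i hss
      have hcast : ((i : Int) + 2) = ((i + 2 : Nat) : Int) := by push_cast; ring
      have hff := PySem.Chars.findFrom_natCast s ['$', '$'] (i + 2) hk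
      set f := PySem.Chars.find (s.drop (i + 2)) ['$', '$'] with hfdef
      have hfm1 := PySem.Chars.neg_one_le_find (s.drop (i + 2)) ['$', '$']
      rw [← hfdef] at hfm1
      by_cases hf0 : f = -1
      · have hjeq : PySem.Chars.findFrom s ['$', '$'] ((i : Int) + 2) none = -1 := by
          rw [hcast, hff, if_pos hf0]
        simp only [hjeq]
        rw [if_pos (by norm_num)]
        have hArec : Arec (s.drop i) = s[i] :: Arec (s.drop (i + 1)) := by
          rw [hdt, Arec, if_pos hpre', List.drop_drop, show i + 1 + 1 = i + 2 from rfl,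
            ← hfdef, if_pos (show f < 0 by omega)]
        rw [ih (i + 1) (out ++ [[s[i]]]) (by omega), pvJoin1, hArec]
        all_goals simp
      · have hjeq : PySem.Chars.findFrom s ['$', '$'] ((i : Int) + 2) none =
            ((i + 2 : Nat) : Int) + f := by
          rw [hcast, hff, if_neg hf0]
        simp only [hjeq]
        rw [if_neg (by omega)]
        rw [show (((i + 2 : Nat) : Int) + f).toNat + 2 = i + (f.toNat + 4) from by omega]
        have hslice : PySem.List.slice s (some (i : Int)) (some (((i + 2 : Nat) : Int) + f + 2)) =
            (s.drop i).take (f.toNat + 4) := by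
          rw [show (((i + 2 : Nat) : Int) + f + 2) = ((i + (f.toNat + 4) : Nat) : Int) from by
            push_cast; omega]
          rw [PySem.List.slice_natCast s i (i + (f.toNat + 4))]
          rw [show i + (f.toNat + 4) - i = f.toNat + 4 from by omega]
        rw [hslice]
        have hArec : Arec (s[i] :: s.drop (i + 1)) =
            List.take (f.toNat + 4) (s[i] :: s.drop (i + 1)) ++
              Arec (List.drop (f.toNat + 4) (s[i] :: s.drop (i + 1))) := by
          rw [Arec, if_pos hpre', List.drop_drop, show i + 1 + 1 = i + 2 from rfl,
            ← hfdef, if_neg (show ¬ f < 0 by omega)]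
        rw [ih (i + (f.toNat + 4)) _ (by omega), pvJoin1]
        rw [show List.drop (i + (f.toNat + 4)) s = List.drop (f.toNat + 4) (s[i] :: s.drop (i + 1)) from by
          rw [← hdt, List.drop_drop]]
        rw [hdt, hArec]
        all_goals simp
    · rw [if_neg hss]
      have hnpre : ¬ (['$', '$'] <+: s[i] :: s.drop (i + 1)) := by
        rw [← hdt]
        exact fun hp => hss ((PySem.Chars.startswith_iff _ _).mpr hp)
      by_cases hdollar : s[i] = '$'
      · rw [if_pos hdollar]
        have hk : i + 1 ≤ s.length := by omega
        have hcast : ((i : Int) + 1) = ((i + 1 : Nat) : Int) := by push_cast; ring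
        have hff := PySem.Chars.findFrom_natCast s ['$'] (i + 1) hk
        set f := PySem.Chars.find (s.drop (i + 1)) ['$'] with hfdef
        have hfm1 := PySem.Chars.neg_one_le_find (s.drop (i + 1)) ['$']
        rw [← hfdef] at hfm1
        by_cases hf0 : f = -1
        · have hjeq : PySem.Chars.findFrom s ['$'] ((i : Int) + 1) none = -1 := by
            rw [hcast, hff, if_pos hf0]
          simp only [hjeq]
          rw [if_pos (by norm_num)]
          have hArec : Arec (s.drop i) = s[i] :: Arec (s.drop (i + 1)) := by
            rw [hdt, Arec, if_neg hnpre, if_pos hdollar, ← hfdef,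
              if_pos (show f < 0 by omega)]
            all_goals rfl
          rw [ih (i + 1) (out ++ [[s[i]]]) (by omega), pvJoin1, hArec]
          all_goals simp
        · have hjeq : PySem.Chars.findFrom s ['$'] ((i : Int) + 1) none =
              ((i + 1 : Nat) : Int) + f := by
            rw [hcast, hff, if_neg hf0]
          simp only [hjeq]
          rw [if_neg (by omega)]
          rw [show (((i + 1 : Nat) : Int) + f).toNat + 1 = i + 1 + (f.toNat + 1) from by omega]
          have hslice : PySem.List.slice s (some ((i : Int) + 1)) (some (((i + 1 : Nat) : Int) + f)) =
              (s.drop (i + 1)).take f.toNat := by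
            rw [hcast]
            rw [show (((i + 1 : Nat) : Int) + f) = ((i + 1 + f.toNat : Nat) : Int) from by
              push_cast; omega]
            rw [PySem.List.slice_natCast s (i + 1) (i + 1 + f.toNat)]
            rw [show i + 1 + f.toNat - (i + 1) = f.toNat from by omega]
          rw [hslice]
          have hArec : Arec (s.drop i) =
              ['\\', '('] ++ (s.drop (i + 1)).take f.toNat ++ ['\\', ')'] ++
                Arec ((s.drop (i + 1)).drop (f.toNat + 1)) := by
            rw [hdt, Arec, if_neg hnpre, if_pos hdollar, ← hfdef,
              if_neg (show ¬ f < 0 by omega)]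
          rw [ih (i + 1 + (f.toNat + 1)) _ (by omega), pvJoin1, hArec]
          rw [show List.drop (i + 1 + (f.toNat + 1)) s = (s.drop (i + 1)).drop (f.toNat + 1) from by
            rw [List.drop_drop]]
          all_goals simp [List.append_assoc]
      · rw [if_neg hdollar]
        have hArec : Arec (s.drop i) = s[i] :: Arec (s.drop (i + 1)) := by
          rw [hdt, Arec, if_neg hnpre, if_neg hdollar]
        rw [ih (i + 1) (out ++ [[s[i]]]) (by omega), pvJoin1, hArec]
        all_goals simp
  · rw [aLoop, dif_neg hi]
    rw [show List.drop i s = [] from List.drop_eq_nil_of_le (by omega)]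
    simp [pvArecNil]

theorem pvSplitOnCons (x c : Char) (l : List Char) :
    List.splitOn x (c :: l) =
      if c == x then [] :: List.splitOn x l
      else List.modifyHead (List.cons c) (List.splitOn x l) := by
  simp [List.splitOn, List.splitOnP_cons]

theorem pvSplitOn_ne_nil (s : List Char) : List.splitOn '$' s ≠ [] := by
  induction s with
  | nil => simp [List.splitOn, List.splitOnP_nil]
  | cons c l ih =>
    rw [pvSplitOnCons]
    split
    · simp
    · rcases hx : List.splitOn '$' l with _ | ⟨h0, t⟩
      · exact absurd hx ih
      · simp

theorem pvSplitOn_free (s p : List Char) (h : p ∈ List.splitOn '$' s) : '$' ∉ p := by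
  induction s generalizing p with
  | nil =>
    simp [List.splitOn, List.splitOnP_nil] at h
    simp [h]
  | cons c l ih =>
    rw [pvSplitOnCons] at h
    by_cases hc : c = '$'
    · rw [if_pos (by simp [hc])] at h
      rcases List.mem_cons.mp h with rfl | hm
      · simp
      · exact ih p hm
    · rw [if_neg (by simp [hc])] at h
      rcases hx : List.splitOn '$' l with _ | ⟨h0, t⟩
      · exact absurd hx (pvSplitOn_ne_nil l)
      · rw [hx] at h
        simp only [List.modifyHead_cons] at h
        rcases List.mem_cons.mp h with rfl | hm
        · intro hmem
          rcases List.mem_cons.mp hmem with he | hm'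
          · exact hc he.symm
          · exact ih h0 (by rw [hx]; simp) hm'
        · exact ih p (by rw [hx]; simp [hm])

theorem pvGo (l : List Char) : ∀ (fuel : Nat) (cur : List Char) (acc : List (List Char)),
    l.length < fuel →
    PySem.Chars.splitOn.go ['$'] fuel l cur acc =
      acc.reverse ++ List.modifyHead (cur.reverse ++ ·) (List.splitOn '$' l) := by
  induction l with
  | nil =>
    intro fuel cur acc hf
    cases fuel with
    | zero => omega
    | succ f =>
      show PySem.Chars.splitOn.go ['$'] (f + 1) [] cur acc = _
      simp [PySem.Chars.splitOn.go, List.splitOn, List.splitOnP_nil]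
  | cons c l ih =>
    intro fuel cur acc hf
    cases fuel with
    | zero => omega
    | succ f =>
      by_cases hc : c = '$'
      · have hpre : (['$'] : List Char).isPrefixOf (c :: l) = true := by
          simp [List.isPrefixOf, hc]
        show PySem.Chars.splitOn.go ['$'] (f + 1) (c :: l) cur acc = _
        rw [PySem.Chars.splitOn.go]
        simp only [hpre, if_true]
        rw [show List.drop (['$'] : List Char).length (c :: l) = l by simp]
        rw [ih f [] (cur.reverse :: acc) (by simp at hf; omega)]
        rw [pvSplitOnCons, if_pos (by simp [hc])]
        rcases hx : List.splitOn '$' l with _ | ⟨h0, t⟩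
        · exact absurd hx (pvSplitOn_ne_nil l)
        · simp
      · have hpre : (['$'] : List Char).isPrefixOf (c :: l) = false := by
          simp [List.isPrefixOf]
          exact fun he => hc he.symm
        show PySem.Chars.splitOn.go ['$'] (f + 1) (c :: l) cur acc = _
        rw [PySem.Chars.splitOn.go]
        simp only [hpre, Bool.false_eq_true, if_false]
        rw [ih f (c :: cur) acc (by simp at hf; omega)]
        rw [pvSplitOnCons, if_neg (by simp [hc])]
        rcases hx : List.splitOn '$' l with _ | ⟨h0, t⟩
        · exact absurd hx (pvSplitOn_ne_nil l)
        · simp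

theorem pvSplitOnEq (s : List Char) : PySem.Chars.splitOn s ['$'] = List.splitOn '$' s := by
  show PySem.Chars.splitOn.go ['$'] (s.length + 1) s [] [] = _
  rw [pvGo s (s.length + 1) [] [] (by omega)]
  rcases hx : List.splitOn '$' s with _ | ⟨h0, t⟩
  · exact absurd hx (pvSplitOn_ne_nil s)
  · simp

-- ===== VERDICT (by name: the statement is the Claim_ definition above) =====
theorem dollar_inline_to_paren_spec : Claim_equal_dollar_inline_to_paren := by
  intro text _
  unfold Spec_dollar_inline_to_paren dollar_inline_to_paren dollar_inline_to_paren_alt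
  have hL : PySem.Chars.join [] (aLoop (text.toList.length + 1) text.toList 0 []) =
      Arec text.toList := by
    rw [pvL1 text.toList (text.toList.length + 1) 0 [] (by omega)]
    simp
  have hsegs : PySem.Chars.splitOn text.toList ['$'] = List.splitOn '$' text.toList :=
    pvSplitOnEq text.toList
  rcases hsp : List.splitOn '$' text.toList with _ | ⟨p0, rest⟩
  · exact absurd hsp (pvSplitOn_ne_nil text.toList)
  · have hfree : ∀ p ∈ (p0 :: rest), '$' ∉ p := by
      intro p hp
      exact pvSplitOn_free text.toList p (by rw [hsp]; exact hp)
    have hR : PySem.Chars.join []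
        (bLoop ((p0 :: rest).length + 1) (p0 :: rest) ((p0 :: rest).length - 1) 1
          [(p0 :: rest).headD []]) =
        p0 ++ Arec (Dtail rest) := by
      rw [pvML (p0 :: rest) hfree (by simp) ((p0 :: rest).length + 1) 1 [(p0 :: rest).headD []]
        (le_refl 1) (by omega)]
      simp
    have hs2 : text.toList = p0 ++ Dtail rest := by
      rw [show text.toList = List.intercalate ['$'] (List.splitOn '$' text.toList) from
        (List.intercalate_splitOn text.toList '$').symm, hsp]
      exact pvHeadTail _ _ _ rfl
    simp only [hsegs, hsp]
    rw [hL, hR]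
    exact congrArg String.ofList
      (by rw [hs2, pvArecCopy p0 (Dtail rest) (hfree p0 (by simp))])
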